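-- pv_equiv track=rewrite | github.com/pypi-data/pypi-mirror-264 | packages/RDSDriver/RDSDriver-1.3.3-py3-none-any.whl/rdsdriver/dm/dm.py | modify_query
-- ===== SOURCE A (Python) =====
-- def modify_query(query) -> str:
--     r = []
--     i = 0
--     while i < len(query):
--         if query[i:i+2] == '%s':
--             r.append('?')
--             i += 2
--         elif query[i:i+2] == '%%':
--             r.append('%%')
--             i += 2
--         elif query[i] == '`':
--             r.append('"')
--             i += 1
--         else:
--             r.append(query[i])
--             i += 1
--     return ''.join(r)
-- ===== SOURCE B (Python) =====
-- import re
--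
-- _REPL = {'%s': '?', '%%': '%%', '`': '"'}
--
-- def modify_query(query) -> str:
--     return re.sub(r'%s|%%|`', lambda m: _REPL[m.group(0)], query)
-- ===== Notes on version B (the rewrite author's own statement) =====
-- stated objective: idiomatic
-- what changed: Replaced the manual index-scanning while-loop and list accumulator with a single re.sub whose three-alternative pattern (placeholder, escaped percent, backtick, in that priority order) drives the traversal and a callback maps each match to its replacement.
import Mathlib
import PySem

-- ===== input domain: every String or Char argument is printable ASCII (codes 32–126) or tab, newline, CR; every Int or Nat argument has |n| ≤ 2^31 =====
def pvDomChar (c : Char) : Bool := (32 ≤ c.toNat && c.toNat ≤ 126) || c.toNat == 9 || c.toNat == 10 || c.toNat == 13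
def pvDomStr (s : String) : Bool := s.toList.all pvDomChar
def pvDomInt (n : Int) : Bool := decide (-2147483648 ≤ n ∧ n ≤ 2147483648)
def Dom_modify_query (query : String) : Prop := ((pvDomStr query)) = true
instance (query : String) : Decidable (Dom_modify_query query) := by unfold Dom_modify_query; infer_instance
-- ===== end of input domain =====

-- B replaces A's index-scanning while-loop with a single regex substitution (re.sub with a
-- callback in Python; ported as the regex engine's left-to-right alternation scan): idiomatic, same cost.

-- ===== PORT A =====
-- A's while-loop over an index i with an accumulator r; query[i:i+2] is PySem.List.slice,
-- query[i] (guarded by i < len) is cs[i].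
def modifyLoopA (cs : List Char) (r : List Char) (i : Nat) : List Char :=
  if h : i < cs.length then
    if PySem.List.slice cs (some (i : Int)) (some ((i : Int) + 2)) = ['%', 's'] then
      modifyLoopA cs (r ++ ['?']) (i + 2)
    else if PySem.List.slice cs (some (i : Int)) (some ((i : Int) + 2)) = ['%', '%'] then
      modifyLoopA cs (r ++ ['%', '%']) (i + 2)
    else if cs[i] = '`' then
      modifyLoopA cs (r ++ ['"']) (i + 1)
    else
      modifyLoopA cs (r ++ [cs[i]]) (i + 1)
  else r
termination_by cs.length - i

def modify_query (query : String) : String :=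
  String.ofList (modifyLoopA query.toList [] 0)

-- ===== PORT B =====
-- Source B's re.sub with pattern '%s|%%|`' scans left to right, at each position trying the
-- alternatives '%s', '%%', '`' in that order; unmatched characters are copied unchanged.
-- Ported exactly as that scan (the callback's mapping is the three replacement lists).
def modifyLoopB : List Char → List Char
  | [] => []
  | c :: cs =>
    match cs with
    | d :: ds =>
      if c = '%' && d = 's' then '?' :: modifyLoopB ds
      else if c = '%' && d = '%' then '%' :: '%' :: modifyLoopB ds
      else if c = '`' then '"' :: modifyLoopB (d :: ds)
      else c :: modifyLoopB (d :: ds)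
    | [] => [if c = '`' then '"' else c]

def modify_query_alt (query : String) : String :=
  String.ofList (modifyLoopB query.toList)

-- ===== PRECONDITION & SPEC =====
def Spec_modify_query (query : String) (out : String) : Prop := out = modify_query_alt query
instance (query : String) (out : String) : Decidable (Spec_modify_query query out) := by unfold Spec_modify_query; infer_instance

-- ===== CLAIM (what is proved, stated in full; the proofs are below) =====
def Claim_equal_modify_query : Prop := ∀ (query : String), Dom_modify_query query → Spec_modify_query query (modify_query query)

-- ===== LEMMAS AND PROOFS =====

lemma drop_add_two (cs : List Char) (i : Nat) (a b : Char) (rest : List Char)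
    (hd : cs.drop i = a :: b :: rest) : cs.drop (i + 2) = rest := by
  have h2 := congrArg (List.drop 2) hd
  rw [List.drop_drop] at h2
  simpa using h2

lemma modifyLoopA_eq (cs : List Char) (r : List Char) (i : Nat) :
    modifyLoopA cs r i = r ++ modifyLoopB (cs.drop i) := by
  fun_induction modifyLoopA cs r i with
  | case1 r i h h1 ih =>
    rw [ih]
    have hsl : PySem.List.slice cs (some (i : Int)) (some ((i : Int) + 2)) = (cs.drop i).take 2 := by
      exact_mod_cast PySem.List.slice_natCast_add cs i 2
    rw [hsl] at h1
    rcases hd : cs.drop i with _ | ⟨a, _ | ⟨b, rest⟩⟩ <;> rw [hd] at h1 <;> simp at h1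
    obtain ⟨ha, hb⟩ := h1
    subst ha hb
    rw [drop_add_two cs i _ _ _ hd]
    simp [modifyLoopB]
  | case2 r i h h1 h2 ih =>
    rw [ih]
    have hsl : PySem.List.slice cs (some (i : Int)) (some ((i : Int) + 2)) = (cs.drop i).take 2 := by
      exact_mod_cast PySem.List.slice_natCast_add cs i 2
    rw [hsl] at h2
    rcases hd : cs.drop i with _ | ⟨a, _ | ⟨b, rest⟩⟩ <;> rw [hd] at h2 <;> simp at h2
    obtain ⟨ha, hb⟩ := h2
    subst ha hb
    rw [drop_add_two cs i _ _ _ hd]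
    simp [modifyLoopB]
  | case3 r i h h1 h2 h3 ih =>
    rw [ih]
    have hd : cs.drop i = cs[i] :: cs.drop (i + 1) := List.drop_eq_getElem_cons h
    rw [hd, h3]
    rcases ht : cs.drop (i + 1) with _ | ⟨b, rest⟩ <;> simp [modifyLoopB]
  | case4 r i h h1 h2 h3 ih =>
    rw [ih]
    have hsl : PySem.List.slice cs (some (i : Int)) (some ((i : Int) + 2)) = (cs.drop i).take 2 := by
      exact_mod_cast PySem.List.slice_natCast_add cs i 2
    rw [hsl] at h1 h2
    have hd : cs.drop i = cs[i] :: cs.drop (i + 1) := List.drop_eq_getElem_cons h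
    rw [hd]
    rcases ht : cs.drop (i + 1) with _ | ⟨b, rest⟩
    · simp [modifyLoopB, h3]
    · rw [hd, ht] at h1 h2
      simp only [List.take] at h1 h2
      have h1' : ¬ (cs[i] = '%' ∧ b = 's') := fun ⟨x, y⟩ => h1 (by rw [x, y])
      have h2' : ¬ (cs[i] = '%' ∧ b = '%') := fun ⟨x, y⟩ => h2 (by rw [x, y])
      simp only [modifyLoopB]
      rw [if_neg (by simpa using h1'), if_neg (by simpa using h2'), if_neg h3]
      simp
  | case5 r i h =>
    rw [List.drop_of_length_le (by omega)]
    simp [modifyLoopB]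

-- ===== VERDICT (by name: the statement is the Claim_ definition above) =====
theorem modify_query_spec : Claim_equal_modify_query := by
  intro query _
  unfold Spec_modify_query modify_query modify_query_alt
  rw [modifyLoopA_eq]
  simp
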